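-- pv_equiv track=rewrite | github.com/NewYorker3327/LedRegister | numbers.py | new_number
-- ===== SOURCE A (Python) =====
-- def new_number(len_:int):
--     number = {"0":[*[1 for i in range(len_)],
--                     *[1 for i in range(len_)],
--                     *[1 for i in range(len_)],
--                     *[1 for i in range(len_)],
--                     *[1 for i in range(len_)],
--                     *[1 for i in range(len_)],
--                     *[0 for i in range(len_)]],
--                "1":[*[0 for i in range(len_)],
--                     *[0 for i in range(len_)],
--                     *[1 for i in range(len_)],
--                     *[1 for i in range(len_)],
--                     *[0 for i in range(len_)],
--                     *[0 for i in range(len_)],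
--                     *[0 for i in range(len_)]],
--                "2":[*[1 for i in range(len_)],
--                     *[1 for i in range(len_)],
--                     *[0 for i in range(len_)],
--                     *[1 for i in range(len_)],
--                     *[1 for i in range(len_)],
--                     *[0 for i in range(len_)],
--                     *[1 for i in range(len_)]],
--                "3":[*[0 for i in range(len_)],
--                     *[1 for i in range(len_)],
--                     *[1 for i in range(len_)],
--                     *[1 for i in range(len_)],
--                     *[1 for i in range(len_)],
--                     *[0 for i in range(len_)],
--                     *[1 for i in range(len_)]],
--                "4":[*[0 for i in range(len_)],
--                     *[0 for i in range(len_)],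
--                     *[1 for i in range(len_)],
--                     *[1 for i in range(len_)],
--                     *[0 for i in range(len_)],
--                     *[1 for i in range(len_)],
--                     *[1 for i in range(len_)]],
--                "5":[*[0 for i in range(len_)],
--                     *[1 for i in range(len_)],
--                     *[1 for i in range(len_)],
--                     *[0 for i in range(len_)],
--                     *[1 for i in range(len_)],
--                     *[1 for i in range(len_)],
--                     *[1 for i in range(len_)]],
--                "6":[*[1 for i in range(len_)],
--                     *[1 for i in range(len_)],
--                     *[1 for i in range(len_)],
--                     *[0 for i in range(len_)],
--                     *[1 for i in range(len_)],
--                     *[1 for i in range(len_)],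
--                     *[1 for i in range(len_)]],
--                "7":[*[0 for i in range(len_)],
--                     *[0 for i in range(len_)],
--                     *[1 for i in range(len_)],
--                     *[1 for i in range(len_)],
--                     *[1 for i in range(len_)],
--                     *[0 for i in range(len_)],
--                     *[0 for i in range(len_)]],
--                "8":[*[1 for i in range(len_)],
--                     *[1 for i in range(len_)],
--                     *[1 for i in range(len_)],
--                     *[1 for i in range(len_)],
--                     *[1 for i in range(len_)],
--                     *[1 for i in range(len_)],
--                     *[1 for i in range(len_)]],
--                "9":[*[0 for i in range(len_)],
--                     *[1 for i in range(len_)],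
--                     *[1 for i in range(len_)],
--                     *[1 for i in range(len_)],
--                     *[1 for i in range(len_)],
--                     *[1 for i in range(len_)],
--                     *[1 for i in range(len_)]]}
--     return number
-- ===== SOURCE B (Python) =====
-- # Transposed, segment-major construction: for each of the 7 LED segments we
-- # record which digits light it, and grow every digit's row segment by segment.
-- SEGMENT_LIT = [
--     ("0", "2", "6", "8"),                                    # segment 0
--     ("0", "2", "3", "5", "6", "8", "9"),                     # segment 1
--     ("0", "1", "3", "4", "5", "6", "7", "8", "9"),           # segment 2
--     ("0", "1", "2", "3", "4", "7", "8", "9"),                # segment 3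
--     ("0", "2", "3", "5", "6", "7", "8", "9"),                # segment 4
--     ("0", "4", "5", "6", "8", "9"),                          # segment 5
--     ("2", "3", "4", "5", "6", "8", "9"),                     # segment 6
-- ]
-- DIGITS = ("0", "1", "2", "3", "4", "5", "6", "7", "8", "9")
--
-- def new_number(len_: int):
--     number = {d: [] for d in DIGITS}
--     for lit in SEGMENT_LIT:
--         for d in DIGITS:
--             number[d] += [1 if d in lit else 0] * len_
--     return number
-- ===== Notes on version B (the rewrite author's own statement) =====
-- stated objective: alternative
-- what changed: Transposes the construction: instead of ten inlined digit rows of range comprehensions, B keeps a segment-major table (segment -> set of digits that light it) and grows every digit's row by appending one run per segment.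
import Mathlib
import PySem

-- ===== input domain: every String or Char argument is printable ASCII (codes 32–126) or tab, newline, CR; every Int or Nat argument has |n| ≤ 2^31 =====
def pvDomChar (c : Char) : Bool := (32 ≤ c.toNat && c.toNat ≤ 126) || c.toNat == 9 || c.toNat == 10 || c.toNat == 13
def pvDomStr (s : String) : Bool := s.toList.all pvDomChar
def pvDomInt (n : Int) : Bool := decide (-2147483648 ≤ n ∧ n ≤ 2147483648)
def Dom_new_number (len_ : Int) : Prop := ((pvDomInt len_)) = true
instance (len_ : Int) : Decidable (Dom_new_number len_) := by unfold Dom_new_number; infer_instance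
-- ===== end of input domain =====

-- B transposes the construction to segment-major order (segment -> lit digits),
-- growing each digit's row by one run per segment (objective: alternative).


-- ===== PORT A =====
-- each '[1 for i in range(len_)]' / '[0 for i in range(len_)]' ported literally
def new_number (len_ : Int) : List (String × List Int) :=
  let one : List Int := (PySem.List.pyRange 0 len_ 1).map (fun _ => 1)
  let zero : List Int := (PySem.List.pyRange 0 len_ 1).map (fun _ => 0)
  let number : List (String × List Int) :=
    [("0", one ++ one ++ one ++ one ++ one ++ one ++ zero),
     ("1", zero ++ zero ++ one ++ one ++ zero ++ zero ++ zero),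
     ("2", one ++ one ++ zero ++ one ++ one ++ zero ++ one),
     ("3", zero ++ one ++ one ++ one ++ one ++ zero ++ one),
     ("4", zero ++ zero ++ one ++ one ++ zero ++ one ++ one),
     ("5", zero ++ one ++ one ++ zero ++ one ++ one ++ one),
     ("6", one ++ one ++ one ++ zero ++ one ++ one ++ one),
     ("7", zero ++ zero ++ one ++ one ++ one ++ zero ++ zero),
     ("8", one ++ one ++ one ++ one ++ one ++ one ++ one),
     ("9", zero ++ one ++ one ++ one ++ one ++ one ++ one)]
  number

-- ===== PORT B =====
-- segment-major table: for each of the 7 segments, the digits that light it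
def pvSegmentLit : List (List String) :=
  [["0", "2", "6", "8"],
   ["0", "2", "3", "5", "6", "8", "9"],
   ["0", "1", "3", "4", "5", "6", "7", "8", "9"],
   ["0", "1", "2", "3", "4", "7", "8", "9"],
   ["0", "2", "3", "5", "6", "7", "8", "9"],
   ["0", "4", "5", "6", "8", "9"],
   ["2", "3", "4", "5", "6", "8", "9"]]

def pvDigits : List String :=
  ["0", "1", "2", "3", "4", "5", "6", "7", "8", "9"]

-- 'number[d] += [b] * len_' for every d in order = map over the association list
-- (all keys present, insertion order unchanged); '[b] * len_' is exact as
-- List.replicate len_.toNat b (Python's repetition by a non-positive count is []).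
def new_number_alt (len_ : Int) : List (String × List Int) :=
  let init : List (String × List Int) := pvDigits.map (fun d => (d, []))
  pvSegmentLit.foldl
    (fun acc lit =>
      acc.map (fun p =>
        (p.1, p.2 ++ List.replicate len_.toNat (if lit.contains p.1 then 1 else 0))))
    init

-- ===== PRECONDITION & SPEC =====
def Spec_new_number (len_ : Int) (out : List (String × List Int)) : Prop := out = new_number_alt len_
instance (len_ : Int) (out : List (String × List Int)) : Decidable (Spec_new_number len_ out) := by unfold Spec_new_number; infer_instance

-- ===== CLAIM (what is proved, stated in full; the proofs are below) =====
def Claim_equal_new_number : Prop := ∀ (len_ : Int), Dom_new_number len_ → Spec_new_number len_ (new_number len_)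

-- ===== LEMMAS AND PROOFS =====
-- ===== VERDICT (by name: the statement is the Claim_ definition above) =====
theorem new_number_spec : Claim_equal_new_number := by
  intro len_ _
  unfold Spec_new_number new_number new_number_alt pvSegmentLit pvDigits
  simp [List.append_assoc]
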